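-- pv_equiv track=rewrite | github.com/mua-uniandes/weekly-problems | codeforces/1354/1354A.py | operacion
-- ===== SOURCE A (Python) =====
-- def operacion(linea):
--     a = linea[0]
--     b = linea[1]
--     c = linea[2]
--     d = linea[3]
--     time = b
--     sueno = 0
--     if a > b:
--         time = b
--         sueno = b
--         if c < d:
--             time = -1
--         else:
--             while sueno < a:
--                 time += c
--                 sueno+=(c-d)
--     return time
-- ===== SOURCE B (Python) =====
-- def operacion(linea):
--     a, b, c, d = linea[0], linea[1], linea[2], linea[3]
--     if a <= b:
--         return b
--     if c < d:
--         return -1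
--     # closed form: k = ceil((a-b)/(c-d)) naps of length c each
--     k = -((b - a) // (c - d))
--     return b + k * c
-- ===== Notes on version B (the rewrite author's own statement) =====
-- stated objective: simpler
-- what changed: replaces the step-by-step nap simulation loop with a closed-form ceiling division k = -((b-a)//(c-d)), time = b + k*c; intended as faster in loop count, but a timing run measured only 1.28x at the largest size, so no speed is claimed
-- outside the precondition, e.g. on operacion([5, 1, 2, 2]): A does not finish within the time limit, B raises ZeroDivisionError; on operacion([1, 2, 3]): A raises IndexError, B raises IndexError; on operacion([1]): A raises IndexError, B raises IndexError
import Mathlib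
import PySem

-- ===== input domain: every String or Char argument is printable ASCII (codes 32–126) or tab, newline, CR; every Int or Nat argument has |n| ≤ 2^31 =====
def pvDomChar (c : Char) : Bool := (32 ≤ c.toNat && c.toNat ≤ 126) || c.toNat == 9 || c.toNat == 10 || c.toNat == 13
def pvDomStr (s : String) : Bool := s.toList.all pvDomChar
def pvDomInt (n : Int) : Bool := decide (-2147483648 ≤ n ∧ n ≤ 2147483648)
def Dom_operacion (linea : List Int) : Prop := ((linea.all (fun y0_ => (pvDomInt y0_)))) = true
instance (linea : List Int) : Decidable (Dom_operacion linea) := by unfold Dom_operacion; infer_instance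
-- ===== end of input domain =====

-- B replaces A's step-by-step nap simulation loop with a closed-form ceiling division (objective: simpler; no measured speed claim).

-- ===== PORT A =====
-- the while loop of A: while sueno < a: time += c; sueno += (c - d)
-- the extra conjunct 0 < c - d only makes the recursion total: Python diverges there
-- (reached only when c = d, which Pre_operacion excludes)
def opLoop (a c d time sueno : Int) : Int :=
  if _h : sueno < a ∧ 0 < c - d then opLoop a c d (time + c) (sueno + (c - d))
  else time
termination_by (a - sueno).toNat
decreasing_by omega

def operacion (linea : List Int) : Int :=
  let a := PySem.List.pyGetD linea 0 0
  let b := PySem.List.pyGetD linea 1 0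
  let c := PySem.List.pyGetD linea 2 0
  let d := PySem.List.pyGetD linea 3 0
  -- time = b; sueno = 0
  if b < a then
    -- time = b; sueno = b
    if c < d then -1
    else opLoop a c d b b
  else b

-- ===== PORT B =====
def operacion_alt (linea : List Int) : Int :=
  let a := PySem.List.pyGetD linea 0 0
  let b := PySem.List.pyGetD linea 1 0
  let c := PySem.List.pyGetD linea 2 0
  let d := PySem.List.pyGetD linea 3 0
  if a ≤ b then b
  else if c < d then -1
  else
    let k := -(PySem.Int.floordiv (b - a) (c - d))
    b + k * c

-- ===== PRECONDITION & SPEC =====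
-- Pre_ excludes lists shorter than 4 (A raises IndexError) and the inputs with
-- linea[1] < linea[0] and linea[2] = linea[3], on which A's while loop never terminates.
def Pre_operacion (linea : List Int) : Prop :=
  4 ≤ linea.length ∧
    (linea.getD 1 0 < linea.getD 0 0 → linea.getD 2 0 ≠ linea.getD 3 0)
instance (linea : List Int) : Decidable (Pre_operacion linea) := by unfold Pre_operacion; infer_instance

def pvWitness_operacion : List Int := [5, 1, 5, 1]

def Spec_operacion (linea : List Int) (out : Int) : Prop := out = operacion_alt linea
instance (linea : List Int) (out : Int) : Decidable (Spec_operacion linea out) := by unfold Spec_operacion; infer_instance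

-- ===== CLAIM (what is proved, stated in full; the proofs are below) =====
def Claim_equal_operacion : Prop := ∀ (linea : List Int), Dom_operacion linea → Pre_operacion linea → Spec_operacion linea (operacion linea)

-- ===== LEMMAS AND PROOFS =====

-- the loop computes the closed form: ceil((a-s)/(c-d)) naps of length c added to t
theorem opLoop_eq (a c d t s : Int) (he : 0 < c - d) (hs : s < a) :
    opLoop a c d t s = t + (-(PySem.Int.floordiv (s - a) (c - d))) * c := by
  rw [opLoop]
  rw [dif_pos ⟨hs, he⟩]
  by_cases h2 : s + (c - d) < a
  · have ih := opLoop_eq a c d (t + c) (s + (c - d)) he h2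
    rw [ih]
    have hq2 : -(PySem.Int.floordiv (-(a - (s + (c - d)))) (c - d))
        = -(PySem.Int.floordiv (-(a - (s + (c - d)))) (c - d)) := rfl
    set q2 := -(PySem.Int.floordiv (-(a - (s + (c - d)))) (c - d)) with hq2def
    have hb := (PySem.Int.neg_floordiv_neg_eq_iff_of_pos he).mp hq2
    have hrw : s + (c - d) - a = -(a - (s + (c - d))) := by ring
    have hgoal : -(PySem.Int.floordiv (s - a) (c - d)) = q2 + 1 := by
      have : s - a = -(a - s) := by ring
      rw [this]
      rw [PySem.Int.neg_floordiv_neg_eq_iff_of_pos he]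
      constructor
      · have : (q2 + 1 - 1) * (c - d) = q2 * (c - d) := by ring
        rw [this]
        nlinarith [hb.1, hb.2]
      · have : (q2 + 1) * (c - d) = q2 * (c - d) + (c - d) := by ring
        rw [this]
        nlinarith [hb.1, hb.2]
    rw [hrw, ← hq2def, hgoal]
    ring
  · rw [opLoop]
    rw [dif_neg (by omega : ¬ (s + (c - d) < a ∧ 0 < c - d))]
    have hgoal : -(PySem.Int.floordiv (s - a) (c - d)) = 1 := by
      have : s - a = -(a - s) := by ring
      rw [this]
      rw [PySem.Int.neg_floordiv_neg_eq_iff_of_pos he]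
      constructor
      · nlinarith
      · nlinarith
    rw [hgoal]
    ring
termination_by (a - s).toNat
decreasing_by omega

-- ===== VERDICT (by name: the statement is the Claim_ definition above) =====
theorem operacion_spec : Claim_equal_operacion := by
  intro linea _ hpre
  obtain ⟨hlen, hne⟩ := hpre
  rcases linea with _ | ⟨a, _ | ⟨b, _ | ⟨c, _ | ⟨d, rest⟩⟩⟩⟩ <;>
    simp only [List.length_nil, List.length_cons] at hlen <;> try omega
  simp only [List.getD, List.getElem?_cons_zero, List.getElem?_cons_succ,
    Option.getD_some] at hne
  unfold Spec_operacion operacion operacion_alt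
  have e0 : PySem.List.pyGetD (a::b::c::d::rest) 0 0 = a := by
    have h : (0:Int) = ((0:Nat):Int) := by norm_num
    rw [h, PySem.List.pyGetD_natCast]; rfl
  have e1 : PySem.List.pyGetD (a::b::c::d::rest) 1 0 = b := by
    have h : (1:Int) = ((1:Nat):Int) := by norm_num
    rw [h, PySem.List.pyGetD_natCast]; rfl
  have e2 : PySem.List.pyGetD (a::b::c::d::rest) 2 0 = c := by
    have h : (2:Int) = ((2:Nat):Int) := by norm_num
    rw [h, PySem.List.pyGetD_natCast]; rfl
  have e3 : PySem.List.pyGetD (a::b::c::d::rest) 3 0 = d := by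
    have h : (3:Int) = ((3:Nat):Int) := by norm_num
    rw [h, PySem.List.pyGetD_natCast]; rfl
  simp only [e0, e1, e2, e3]
  by_cases hab : b < a
  · rw [if_pos hab, if_neg (by omega : ¬ a ≤ b)]
    by_cases hcd : c < d
    · rw [if_pos hcd, if_pos hcd]
    · rw [if_neg hcd, if_neg hcd]
      have he : 0 < c - d := by
        have := hne hab
        omega
      rw [opLoop_eq a c d b b he hab]
  · rw [if_neg hab, if_pos (by omega : a ≤ b)]
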